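-- pv_equiv track=rewrite | github.com/sujalmh/auto-sql-ingestion | app/core/excel_analyzer.py | _detect_col_range
-- ===== SOURCE A (Python) =====
-- from typing import Dict, List, Optional, Tuple
--
-- def _detect_col_range(
--     grid: List[List], header_rows: List[int], max_col: int,
-- ) -> Tuple[int, int]:
--     """Detect the range of columns that contain actual data."""
--     min_col = max_col
--     max_col_found = 1
--
--     for r in header_rows:
--         row = grid[r]
--         for c in range(1, len(row)):
--             if row[c] is not None:
--                 min_col = min(min_col, c)
--                 max_col_found = max(max_col_found, c)
--
--     return min_col, max_col_found
-- ===== SOURCE B (Python) =====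
-- def _detect_col_range(grid, header_rows, max_col):
--     """Detect the range of columns that contain actual data."""
--     min_col = max_col
--     max_col_found = 1
--
--     for r in header_rows:
--         row = grid[r]
--         for c in range(1, len(row)):
--             if row[c] is not None:
--                 min_col = min(min_col, c)
--                 break
--         for c in range(len(row) - 1, 0, -1):
--             if row[c] is not None:
--                 max_col_found = max(max_col_found, c)
--                 break
--
--     return min_col, max_col_found
-- ===== Notes on version B (the rewrite author's own statement) =====
-- stated objective: faster
-- what changed: Instead of exhaustively scanning every cell of each header row and folding min/max over all hits, B does a two-ended early-terminating scan per row: a left-to-right scan that breaks at the first non-None cell (updating min_col) and a right-to-left scan that breaks at the last non-None cell (updating max_col_found), touching only the boundary cells.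
import Mathlib
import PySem

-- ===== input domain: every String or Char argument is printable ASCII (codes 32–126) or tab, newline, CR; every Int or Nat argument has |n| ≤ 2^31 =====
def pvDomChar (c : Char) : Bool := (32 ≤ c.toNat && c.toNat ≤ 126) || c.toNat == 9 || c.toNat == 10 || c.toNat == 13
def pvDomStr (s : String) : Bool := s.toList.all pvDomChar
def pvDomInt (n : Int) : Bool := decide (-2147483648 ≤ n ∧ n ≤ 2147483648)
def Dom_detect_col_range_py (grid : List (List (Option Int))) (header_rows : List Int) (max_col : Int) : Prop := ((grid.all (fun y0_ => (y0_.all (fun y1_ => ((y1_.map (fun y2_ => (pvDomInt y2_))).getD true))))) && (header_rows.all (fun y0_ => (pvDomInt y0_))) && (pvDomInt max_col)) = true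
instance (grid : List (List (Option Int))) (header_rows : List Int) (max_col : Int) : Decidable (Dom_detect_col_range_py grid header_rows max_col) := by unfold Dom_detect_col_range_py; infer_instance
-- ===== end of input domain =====

-- B replaces A's exhaustive per-row cell scan with two early-terminating boundary scans
-- (first non-None from the left for min, first from the right for max): faster in the
-- common case, identical return value wherever Python A returns (Pre_ excludes the
-- header-row indices on which A raises IndexError).


-- ===== PORT A =====
-- one cell test: row[c] is not None (c always in range 1..len(row)-1 here)
def pvHasData (row : List (Option Int)) (c : Int) : Bool :=
  match PySem.List.pyGet? row c with
  | some (some _) => true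
  | _ => false

-- inner loop body of A: if row[c] is not None then update both min and max
def pvStepA (row : List (Option Int)) (st : Int × Int) (c : Int) : Int × Int :=
  if pvHasData row c then (min st.1 c, max st.2 c) else st

-- outer loop body of A: row = grid[r]; exhaustive scan of columns 1..len(row)-1
def pvRowA (grid : List (List (Option Int))) (st : Int × Int) (r : Int) : Int × Int :=
  match PySem.List.pyGet? grid r with
  | some row => (PySem.List.pyRange 1 (row.length : Int) 1).foldl (pvStepA row) st
  | none => st   -- Python raises IndexError here; excluded by Pre_

def detect_col_range_py (grid : List (List (Option Int))) (header_rows : List Int) (max_col : Int) : Int × Int :=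
  header_rows.foldl (pvRowA grid) (max_col, 1)

-- ===== PORT B =====
-- 'for c in <cs>: if row[c] is not None: <hit>; break' — returns first hit index
def pvFirstHit (row : List (Option Int)) : List Int → Option Int
  | [] => none
  | c :: cs => if pvHasData row c then some c else pvFirstHit row cs

-- outer loop body of B: left scan (break at first hit) then right scan (break at first hit)
def pvRowB (grid : List (List (Option Int))) (st : Int × Int) (r : Int) : Int × Int :=
  match PySem.List.pyGet? grid r with
  | some row =>
      let st1 : Int × Int :=
        match pvFirstHit row (PySem.List.pyRange 1 (row.length : Int) 1) with
        | some c => (min st.1 c, st.2)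
        | none => st
      match pvFirstHit row (PySem.List.pyRange ((row.length : Int) - 1) 0 (-1)) with
      | some c => (st1.1, max st1.2 c)
      | none => st1
  | none => st   -- Python raises IndexError here; excluded by Pre_

def detect_col_range_py_alt (grid : List (List (Option Int))) (header_rows : List Int) (max_col : Int) : Int × Int :=
  header_rows.foldl (pvRowB grid) (max_col, 1)

-- ===== PRECONDITION & SPEC =====
-- Pre_: every header-row index is a valid Python index into grid (otherwise A raises IndexError)
def Pre_detect_col_range_py (grid : List (List (Option Int))) (header_rows : List Int) (max_col : Int) : Prop :=
  ∀ r ∈ header_rows, PySem.Raise.InRange grid.length r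
instance (grid : List (List (Option Int))) (header_rows : List Int) (max_col : Int) : Decidable (Pre_detect_col_range_py grid header_rows max_col) := by unfold Pre_detect_col_range_py; infer_instance

def pvWitness_detect_col_range_py : List (List (Option Int)) × List Int × Int :=
  ([[none, some 1, none], [none, none, some 2]], [0, 1], 3)

def Spec_detect_col_range_py (grid : List (List (Option Int))) (header_rows : List Int) (max_col : Int) (out : Int × Int) : Prop := out = detect_col_range_py_alt grid header_rows max_col
instance (grid : List (List (Option Int))) (header_rows : List Int) (max_col : Int) (out : Int × Int) : Decidable (Spec_detect_col_range_py grid header_rows max_col out) := by unfold Spec_detect_col_range_py; infer_instance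

-- ===== CLAIM (what is proved, stated in full; the proofs are below) =====
def Claim_equal_detect_col_range_py : Prop := ∀ (grid : List (List (Option Int))) (header_rows : List Int) (max_col : Int), Dom_detect_col_range_py grid header_rows max_col → Pre_detect_col_range_py grid header_rows max_col → Spec_detect_col_range_py grid header_rows max_col (detect_col_range_py grid header_rows max_col)

-- ===== LEMMAS AND PROOFS =====

-- A's inner loop folds min/max over exactly the hit indices
theorem foldA_eq_filter (row : List (Option Int)) (L : List Int) (st : Int × Int) :
    L.foldl (pvStepA row) st
      = ((L.filter (pvHasData row)).foldl min st.1,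
         (L.filter (pvHasData row)).foldl max st.2) := by
  induction L generalizing st with
  | nil => simp
  | cons c cs ih =>
      simp only [List.foldl_cons, List.filter_cons, pvStepA]
      by_cases h : pvHasData row c = true
      · simp [h, ih]
      · simp [h, ih]

-- B's early-break scan returns the head of the hit list
theorem firstHit_eq_head (row : List (Option Int)) (L : List Int) :
    pvFirstHit row L = (L.filter (pvHasData row)).head? := by
  induction L with
  | nil => rfl
  | cons c cs ih =>
      simp only [pvFirstHit, List.filter_cons]
      by_cases h : pvHasData row c = true
      · simp [h]
      · simp [h, ih]

theorem foldl_min_of_le (a : Int) (l : List Int) (h : ∀ x ∈ l, a ≤ x) :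
    l.foldl min a = a := by
  induction l generalizing a with
  | nil => rfl
  | cons x xs ih =>
      have hax : a ≤ x := h x (by simp)
      simp only [List.foldl_cons, min_eq_left hax]
      exact ih a (fun y hy => h y (by simp [hy]))

theorem foldl_min_head (a : Int) (l : List Int) (hl : l.Pairwise (· ≤ ·)) :
    l.foldl min a = (match l.head? with | none => a | some h => min a h) := by
  cases l with
  | nil => rfl
  | cons x xs =>
      simp only [List.head?_cons, List.foldl_cons]
      rcases List.pairwise_cons.mp hl with ⟨hx, _⟩
      exact foldl_min_of_le _ _ (fun y hy => le_trans (min_le_right a x) (hx y hy))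

-- max folded over an ascending list = max with its last element
theorem foldl_max_getLast (a : Int) (l : List Int) (hl : l.Pairwise (· ≤ ·)) :
    l.foldl max a = (match l.getLast? with | none => a | some g => max a g) := by
  induction l generalizing a with
  | nil => rfl
  | cons x xs ih =>
      rcases List.pairwise_cons.mp hl with ⟨hx, hxs⟩
      simp only [List.foldl_cons, ih (max a x) hxs]
      cases hg : xs.getLast? with
      | none =>
          have : xs = [] := List.getLast?_eq_none_iff.mp hg
          subst this; rfl
      | some g =>
          have hgx : g ∈ xs := List.mem_of_getLast? hg
          have hxg : x ≤ g := hx g hgx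
          have hne : xs ≠ [] := by rintro rfl; simp at hg
          obtain ⟨y, ys, rfl⟩ := List.exists_cons_of_ne_nil hne
          rw [List.getLast?_cons_cons, hg]
          simp [max_assoc, max_eq_right hxg]

-- per-row equality: A's exhaustive fold = B's two boundary scans
theorem row_eq (grid : List (List (Option Int))) (st : Int × Int) (r : Int) :
    pvRowA grid st r = pvRowB grid st r := by
  unfold pvRowA pvRowB
  cases hget : PySem.List.pyGet? grid r with
  | none => rfl
  | some row =>
      simp only []
      have hrev : PySem.List.pyRange ((row.length : Int) - 1) 0 (-1)
          = (PySem.List.pyRange 1 (row.length : Int) 1).reverse := by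
        rw [PySem.List.pyRange_neg_one_eq_reverse]; norm_num
      set L := PySem.List.pyRange 1 (row.length : Int) 1 with hL
      have hpw : L.Pairwise (· ≤ ·) :=
        (PySem.List.pairwise_lt_pyRange_one 1 (row.length : Int)).imp (fun h => le_of_lt h)
      set F := L.filter (pvHasData row) with hF
      have hFpw : F.Pairwise (· ≤ ·) := hpw.filter _
      rw [foldA_eq_filter, firstHit_eq_head, hrev, firstHit_eq_head,
          List.filter_reverse, List.head?_reverse, ← hF,
          foldl_min_head st.1 F hFpw, foldl_max_getLast st.2 F hFpw]
      cases hh : F.head? with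
      | none =>
          have : F = [] := List.head?_eq_none_iff.mp hh
          simp [this]
      | some hd =>
          cases hg : F.getLast? with
          | none =>
              exfalso
              have : F = [] := List.getLast?_eq_none_iff.mp hg
              simp [this] at hh
          | some g => simp

-- ===== VERDICT (by name: the statement is the Claim_ definition above) =====
theorem detect_col_range_py_spec : Claim_equal_detect_col_range_py := by
  intro grid header_rows max_col _ _
  unfold Spec_detect_col_range_py detect_col_range_py detect_col_range_py_alt
  have : pvRowA grid = pvRowB grid := by
    funext st r; exact row_eq grid st r
  rw [this]
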